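-- pv_equiv track=rewrite | github.com/jxadhd/UC-COSC121-24S1 | MidsemTest/def threeby(string).py | threeby
-- ===== SOURCE A (Python) =====
-- def threeby(string):
--     """returns a string where every 3rd character in the original string appears
--     5 times"""
--     result = ''
--     for i, char in enumerate(string):
--         if (i % 3) == 0:
--             result += char * 5
--         else:
--             result += char
--     return result
-- ===== SOURCE B (Python) =====
-- def threeby(string):
--     pieces = []
--     i = 0
--     while i < len(string):
--         pieces.append(string[i] * 5 + string[i+1:i+3])
--         i += 3
--     return ''.join(pieces)
-- ===== Notes on version B (the rewrite author's own statement) =====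
-- stated objective: alternative
-- what changed: B walks the string in blocks of three (a while-loop stepping by 3, taking string[i]*5 plus the slice of the next two chars, collecting pieces and joining) instead of A's per-character enumerate with an i % 3 test and repeated string concatenation.
import Mathlib
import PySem

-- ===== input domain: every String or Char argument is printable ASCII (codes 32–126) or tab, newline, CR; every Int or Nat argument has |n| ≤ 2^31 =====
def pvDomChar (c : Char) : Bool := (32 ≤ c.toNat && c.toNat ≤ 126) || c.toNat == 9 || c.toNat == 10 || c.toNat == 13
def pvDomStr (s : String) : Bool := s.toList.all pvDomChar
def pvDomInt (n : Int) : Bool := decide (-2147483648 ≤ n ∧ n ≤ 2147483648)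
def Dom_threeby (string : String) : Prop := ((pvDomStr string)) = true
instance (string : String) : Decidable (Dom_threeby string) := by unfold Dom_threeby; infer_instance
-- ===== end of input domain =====

-- B walks the string in blocks of three instead of testing i % 3 per character; objective: alternative decomposition.

-- ===== PORT A =====
-- A: result = ''; for i, char in enumerate(string): result += char*5 if i%3==0 else char
def threeby (string : String) : String :=
  String.ofList ((PySem.List.enumerate string.toList 0).foldl
    (fun result p =>
      if PySem.Int.mod p.1 3 == 0 then result ++ List.replicate 5 p.2 else result ++ [p.2]) [])

-- ===== PORT B =====
-- B: while i < len(string): pieces.append(string[i]*5 + string[i+1:i+3]); i += 3; join.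
-- One loop iteration consumes the head and the next two chars (the slice = take 2 of the rest).
def threeby_alt_go : List Char → List (List Char)
  | [] => []
  | c :: rest => (List.replicate 5 c ++ rest.take 2) :: threeby_alt_go (rest.drop 2)
  termination_by l => l.length
  decreasing_by simp

def threeby_alt (string : String) : String :=
  String.ofList (threeby_alt_go string.toList).flatten

-- ===== PRECONDITION & SPEC =====
def Spec_threeby (string : String) (out : String) : Prop := out = threeby_alt string
instance (string : String) (out : String) : Decidable (Spec_threeby string out) := by unfold Spec_threeby; infer_instance

-- ===== CLAIM (what is proved, stated in full; the proofs are below) =====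
def Claim_equal_threeby : Prop := ∀ (string : String), Dom_threeby string → Spec_threeby string (threeby string)

-- ===== LEMMAS AND PROOFS =====

lemma threeby_go_nil : threeby_alt_go [] = [] := threeby_alt_go.eq_1

lemma threeby_go_cons (c : Char) (rest : List Char) :
    threeby_alt_go (c :: rest) = (List.replicate 5 c ++ rest.take 2) :: threeby_alt_go (rest.drop 2) :=
  threeby_alt_go.eq_2 c rest

lemma threeby_fold_eq (n : Nat) : ∀ (l : List Char), l.length ≤ n → ∀ (s : Int), PySem.Int.mod s 3 = 0 →
    ∀ (acc : List Char),
    (PySem.List.enumerate l s).foldl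
      (fun result p =>
        if PySem.Int.mod p.1 3 == 0 then result ++ List.replicate 5 p.2 else result ++ [p.2]) acc
      = acc ++ (threeby_alt_go l).flatten := by
  induction n with
  | zero =>
    intro l hl s hs acc
    have : l = [] := List.eq_nil_of_length_eq_zero (Nat.le_zero.mp hl)
    subst this
    simp [PySem.List.enumerate_nil, threeby_go_nil]
  | succ n ih =>
    intro l hl s hs acc
    have h3 : (0:Int) < 3 := by norm_num
    have hs' : s % 3 = 0 := by rwa [PySem.Int.mod_eq_emod_of_pos h3] at hs
    have d0 : (3:Int) ∣ s := by omega
    have d1 : ¬ (3:Int) ∣ (s+1) := by omega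
    have d2 : ¬ (3:Int) ∣ (s+1+1) := by omega
    have m3 : PySem.Int.mod (s+1+1+1) 3 = 0 := by rw [PySem.Int.mod_eq_emod_of_pos h3]; omega
    match l with
    | [] => simp [PySem.List.enumerate_nil, threeby_go_nil]
    | [c] =>
      simp [PySem.List.enumerate_cons, PySem.List.enumerate_nil, threeby_go_nil, threeby_go_cons, d0]
    | [c, d] =>
      simp [PySem.List.enumerate_cons, PySem.List.enumerate_nil, threeby_go_nil, threeby_go_cons, d0, d1]
    | c :: d :: e :: t =>
      have ht : t.length ≤ n := by simp at hl; omega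
      simp only [PySem.List.enumerate_cons, List.foldl_cons]
      rw [ih t ht (s+1+1+1) m3]
      simp [threeby_go_cons, d0, d1, d2]

-- ===== VERDICT =====
theorem threeby_spec : Claim_equal_threeby := by
  intro string _
  unfold Spec_threeby threeby threeby_alt
  rw [threeby_fold_eq string.toList.length string.toList le_rfl 0 (by decide) []]
  simp
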